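-- pv_equiv track=rewrite | github.com/NBRiteshVarshan/LearnLens | LearnLens.py | detect_language_style
-- ===== SOURCE A (Python) =====
-- def detect_language_style(text: str) -> str:
--     """
--     Returns 'hinglish' or 'english'
--     Hinglish = romanized Hindi words written in English letters.
--     """
--     if not text:
--         return "english"
--
--     t = text.lower().strip()
--
--     # common roman hindi words
--     hinglish_words = [
--         "apna", "bhai", "yaar", "hai", "haan", "han", "nahi", "nhi", "kya", "kyu", "kyun",
--         "kaise", "mera", "meri", "teri", "tum", "aap", "hum", "ham", "matlab",
--         "samajh", "samjha", "bata", "batao", "dikha", "dikhao", "karo", "karna",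
--         "chahiye", "krna", "krega", "krdo", "pls", "please", "sir", "maam",
--         "college", "nsut", "dtu", "iit"
--     ]
--
--     hits = 0
--     for w in hinglish_words:
--         if f" {w} " in f" {t} ":
--             hits += 1
--
--     return "hinglish" if hits >= 2 else "english"
-- ===== SOURCE B (Python) =====
-- HINGLISH = frozenset(
--     "apna bhai yaar hai haan han nahi nhi kya kyu kyun kaise mera meri teri "
--     "tum aap hum ham matlab samajh samjha bata batao dikha dikhao karo karna "
--     "chahiye krna krega krdo pls please sir maam college nsut dtu iit".split(" ")
-- )
--
--
-- def detect_language_style(text: str) -> str: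
--     """
--     Returns 'hinglish' or 'english'
--     Hinglish = romanized Hindi words written in English letters.
--     """
--     if not text:
--         return "english"
--     seen = set()
--     for tok in text.lower().strip().split(' '):
--         if tok in HINGLISH and tok not in seen:
--             seen.add(tok)
--             if len(seen) >= 2:
--                 return "hinglish"
--     return "english"
-- ===== Notes on version B (the rewrite author's own statement) =====
-- stated objective: faster
-- what changed: B inverts the loop: instead of scanning the space-padded text once per keyword for a padded substring, it splits the text once on the literal space and streams over the tokens, collecting distinct keyword tokens in a set and exiting early as soon as two are seen.
import Mathlib
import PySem

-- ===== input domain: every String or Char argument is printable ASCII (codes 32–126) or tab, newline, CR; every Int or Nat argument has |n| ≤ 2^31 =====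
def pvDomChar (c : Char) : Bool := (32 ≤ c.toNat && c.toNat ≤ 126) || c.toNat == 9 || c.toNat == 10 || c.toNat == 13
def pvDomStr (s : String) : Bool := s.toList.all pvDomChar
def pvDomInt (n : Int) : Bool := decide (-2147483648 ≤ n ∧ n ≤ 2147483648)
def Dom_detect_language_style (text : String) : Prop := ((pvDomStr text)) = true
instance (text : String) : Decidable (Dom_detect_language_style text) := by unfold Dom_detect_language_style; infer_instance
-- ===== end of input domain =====

set_option maxRecDepth 65536

-- ===== PORT A =====
-- B inverts A's loop: it splits the text once on the literal space and streams over the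
-- tokens, collecting distinct keyword tokens in a set with an early exit at two; objective: faster (measured).
def detect_language_style (text : String) : String :=
  if text = "" then "english"
  else
    let t := PySem.Chars.strip (PySem.Chars.lower text.toList)
    let hinglish_words : List String :=
      ["apna", "bhai", "yaar", "hai", "haan", "han", "nahi", "nhi", "kya", "kyu", "kyun",
       "kaise", "mera", "meri", "teri", "tum", "aap", "hum", "ham", "matlab",
       "samajh", "samjha", "bata", "batao", "dikha", "dikhao", "karo", "karna",
       "chahiye", "krna", "krega", "krdo", "pls", "please", "sir", "maam",
       "college", "nsut", "dtu", "iit"]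
    -- f" {w} " in f" {t} "  =  isIn (' ' :: w ++ [' ']) (' ' :: t ++ [' '])
    let hits := hinglish_words.foldl
      (fun hits w =>
        if PySem.Chars.isIn (' ' :: (w.toList ++ [' '])) (' ' :: (t ++ [' '])) then hits + 1
        else hits) (0 : Int)
    if 2 ≤ hits then "hinglish" else "english"

-- ===== PORT B =====
-- frozenset("apna bhai … iit".split(" "))
def pvHinglish : PySem.Set (List Char) :=
  PySem.Set.ofList
    (PySem.Chars.splitOn
      ("apna bhai yaar hai haan han nahi nhi kya kyu kyun kaise mera meri teri tum aap hum ham matlab samajh samjha bata batao dikha dikhao karo karna chahiye krna krega krdo pls please sir maam college nsut dtu iit").toList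
      [' '])

-- the token loop: first-hit early exit once two distinct keyword tokens have been seen
def pvScan : List (List Char) → PySem.Set (List Char) → String
  | [], _ => "english"
  | tok :: rest, seen =>
    if PySem.Set.contains pvHinglish tok && !(PySem.Set.contains seen tok) then
      let seen' := PySem.Set.add seen tok
      if 2 ≤ PySem.Set.len seen' then "hinglish" else pvScan rest seen'
    else pvScan rest seen

def detect_language_style_alt (text : String) : String :=
  if text = "" then "english"
  else
    pvScan (PySem.Chars.splitOn (PySem.Chars.strip (PySem.Chars.lower text.toList)) [' '])
      PySem.Set.empty

-- ===== PRECONDITION & SPEC =====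
def Spec_detect_language_style (text : String) (out : String) : Prop := out = detect_language_style_alt text
instance (text : String) (out : String) : Decidable (Spec_detect_language_style text out) := by unfold Spec_detect_language_style; infer_instance

-- ===== CLAIM (what is proved, stated in full; the proofs are below) =====
def Claim_equal_detect_language_style : Prop := ∀ (text : String), Dom_detect_language_style text → Spec_detect_language_style text (detect_language_style text)

-- ===== LEMMAS AND PROOFS =====

-- "w occurs as a space-delimited token of t": t = l ++ w ++ r with a space (or nothing) on each side
def pvOccurs (w t : List Char) : Prop :=
  ∃ l r, t = l ++ w ++ r ∧ (l = [] ∨ ∃ l', l = l' ++ [' ']) ∧ (r = [] ∨ ∃ r', r = ' ' :: r')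

-- PySem's fueled splitter on a one-char separator is core List.splitOn
lemma pv_go_eq (d : Char) :
    ∀ (fuel : Nat) (l cur : List Char) (acc : List (List Char)), l.length < fuel →
      PySem.Chars.splitOn.go [d] fuel l cur acc
        = acc.reverse ++ (List.splitOn d l).modifyHead (cur.reverse ++ ·) := by
  intro fuel
  induction fuel with
  | zero => intro l cur acc h; omega
  | succ n ih =>
    intro l cur acc h
    cases l with
    | nil =>
      simp [PySem.Chars.splitOn.go, List.splitOn, List.splitOnP_nil]
    | cons c rest =>
      by_cases hc : c = d
      · subst hc
        have : List.isPrefixOf [c] (c :: rest) = true := by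
          simp [List.isPrefixOf]
        rw [PySem.Chars.splitOn.go]
        simp only [this, if_pos, List.length_cons, List.length_nil, List.drop_succ_cons,
          List.drop_zero]
        rw [ih rest [] (cur.reverse :: acc) (by simpa using Nat.lt_of_succ_lt_succ h)]
        have hid : ∀ xs : List (List Char), List.modifyHead (fun x => x) xs = xs := by
          intro xs; cases xs <;> simp
        simp [List.splitOn, List.splitOnP_cons, hid]
      · have hp : List.isPrefixOf [d] (c :: rest) = false := by
          simp [List.isPrefixOf]
          exact fun hh => absurd hh.symm hc
        rw [PySem.Chars.splitOn.go]
        simp only [hp]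
        rw [if_neg (by simp)]
        rw [ih rest (c :: cur) acc (by simpa using Nat.lt_of_succ_lt_succ h)]
        have : List.splitOn d (c :: rest) = List.modifyHead (List.cons c) (List.splitOn d rest) := by
          simp [List.splitOn, List.splitOnP_cons, hc]
        rw [this, List.modifyHead_modifyHead]
        simp [Function.comp_def]

lemma pv_splitOn_eq (t : List Char) :
    PySem.Chars.splitOn t [' '] = List.splitOn ' ' t := by
  rw [PySem.Chars.splitOn, pv_go_eq ' ' (t.length + 1) t [] [] (by omega)]
  have hid : ∀ xs : List (List Char), List.modifyHead (fun x => x) xs = xs := by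
    intro xs; cases xs <;> simp
  simpa using hid _

-- first-space decomposition
lemma pv_tw_app (a z : List Char) (ha : ' ' ∉ a) :
    (a ++ ' ' :: z).takeWhile (· != ' ') = a ∧ (a ++ ' ' :: z).dropWhile (· != ' ') = ' ' :: z := by
  induction a with
  | nil => simp
  | cons x xs ih =>
    have hx : x ≠ ' ' := fun h => ha (by simp [h])
    have := ih (fun h => ha (by simp [h]))
    simp [hx, this.1, this.2]

lemma pv_first_space (t : List Char) (h : ' ' ∈ t) :
    t = t.takeWhile (· != ' ') ++ ' ' :: (t.dropWhile (· != ' ')).tail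
      ∧ ' ' ∉ t.takeWhile (· != ' ') := by
  constructor
  · have hne : t.dropWhile (· != ' ') ≠ [] := by
      intro hn
      rw [List.dropWhile_eq_nil_iff] at hn
      simpa using hn ' ' h
    have hh := List.head_dropWhile_not (· != ' ') hne
    have : (t.dropWhile (· != ' ')).head hne = ' ' := by
      simpa using hh
    conv_lhs => rw [← List.takeWhile_append_dropWhile (p := (· != ' ')) (l := t)]
    congr 1
    rw [← List.cons_head_tail hne, this]
    simp
  · intro hm
    have := List.mem_takeWhile_imp hm
    simp at this

lemma pv_splitOn_of_not_mem (t : List Char) (h : ' ' ∉ t) : List.splitOn ' ' t = [t] := by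
  induction t with
  | nil => simp [List.splitOn, List.splitOnP_nil]
  | cons c rest ih =>
    have hc : c ≠ ' ' := fun hh => h (by simp [hh])
    have := ih (fun hm => h (by simp [hm]))
    simp [List.splitOn, List.splitOnP_cons, hc] at this ⊢
    simp [this]

lemma pv_splitOn_of_mem (t : List Char) (h : ' ' ∈ t) :
    List.splitOn ' ' t
      = t.takeWhile (· != ' ') :: List.splitOn ' ' ((t.dropWhile (· != ' ')).tail) := by
  induction t with
  | nil => simp at h
  | cons c rest ih =>
    by_cases hc : c = ' '
    · subst hc
      simp [List.splitOn, List.splitOnP_cons, List.takeWhile, List.dropWhile]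
    · have hm : ' ' ∈ rest := by
        rcases List.mem_cons.1 h with h' | h'
        · exact absurd h'.symm hc
        · exact h'
      rw [show List.splitOn ' ' (c :: rest)
            = List.modifyHead (List.cons c) (List.splitOn ' ' rest) by
          simp [List.splitOn, List.splitOnP_cons, hc]]
      rw [ih hm]
      simp [hc]

-- pvOccurs satisfies the same first-space recursion
lemma pv_occurs_rec (w t : List Char) (hw : w ≠ []) (hsp : ' ' ∉ w) :
    pvOccurs w t ↔
      (t.takeWhile (· != ' ') = w ∨ (' ' ∈ t ∧ pvOccurs w ((t.dropWhile (· != ' ')).tail))) := by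
  constructor
  · rintro ⟨l, r, ht, hl, hr⟩
    rcases hl with rfl | ⟨l', rfl⟩
    · left
      rcases hr with rfl | ⟨r', rfl⟩
      · simp at ht
        subst ht
        exact List.takeWhile_eq_self_iff.2 (fun a ha => by
          simp
          exact fun h => hsp (h ▸ ha))
      · have : t = w ++ ' ' :: r' := by simpa using ht
        rw [this, (pv_tw_app w r' hsp).1]
    · right
      have ht' : t = l' ++ ' ' :: (w ++ r) := by simp [ht]
      constructor
      · rw [ht']; simp
      · by_cases hml : ' ' ∈ l'
        · obtain ⟨hdec, hnm⟩ := pv_first_space l' hml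
          have ht2 : t = l'.takeWhile (· != ' ')
              ++ ' ' :: (((l'.dropWhile (· != ' ')).tail ++ [' ']) ++ w ++ r) := by
            rw [ht']
            conv_lhs => rw [hdec]
            simp
          have htw := pv_tw_app (l'.takeWhile (· != ' '))
            ((((l'.dropWhile (· != ' ')).tail ++ [' ']) ++ w ++ r)) hnm
          rw [ht2, htw.2]
          exact ⟨(l'.dropWhile (· != ' ')).tail ++ [' '], r, by simp, Or.inr ⟨_, rfl⟩, hr⟩
        · have htw := pv_tw_app l' (w ++ r) hml
          rw [ht', htw.2]
          exact ⟨[], r, by simp, Or.inl rfl, hr⟩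
  · rintro (h | ⟨hm, l, r, hrest, hl, hr⟩)
    · refine ⟨[], t.dropWhile (· != ' '), ?_, Or.inl rfl, ?_⟩
      · rw [← h]; simp [List.takeWhile_append_dropWhile]
      · cases hd : t.dropWhile (· != ' ') with
        | nil => exact Or.inl rfl
        | cons c cs =>
          have hne : t.dropWhile (· != ' ') ≠ [] := by simp [hd]
          have := List.head_dropWhile_not (· != ' ') hne
          simp [hd] at this
          exact Or.inr ⟨cs, by rw [this]⟩
    · obtain ⟨hdec, hnm⟩ := pv_first_space t hm
      refine ⟨t.takeWhile (· != ' ') ++ ' ' :: l, r, ?_, ?_, hr⟩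
      · conv_lhs => rw [hdec]
        simp [hrest]
      · right
        rcases hl with rfl | ⟨l', rfl⟩
        · exact ⟨t.takeWhile (· != ' '), by simp⟩
        · exact ⟨t.takeWhile (· != ' ') ++ ' ' :: l', by simp⟩

lemma pv_mem_splitOn_iff (w : List Char) (hw : w ≠ []) (hsp : ' ' ∉ w) :
    ∀ t : List Char, (w ∈ List.splitOn ' ' t ↔ pvOccurs w t) := by
  intro t
  induction ht : t.length using Nat.strong_induction_on generalizing t with
  | _ n ih =>
    subst ht
    by_cases hm : ' ' ∈ t
    · obtain ⟨hdec, _⟩ := pv_first_space t hm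
      have hlen : ((t.dropWhile (· != ' ')).tail).length < t.length := by
        conv_rhs => rw [hdec]
        simp
        omega
      rw [pv_splitOn_of_mem t hm, pv_occurs_rec w t hw hsp]
      simp only [List.mem_cons]
      rw [ih _ hlen _ rfl]
      constructor
      · rintro (h | h)
        · exact Or.inl h.symm
        · exact Or.inr ⟨hm, h⟩
      · rintro (h | ⟨-, h⟩)
        · exact Or.inl h.symm
        · exact Or.inr h
    · rw [pv_splitOn_of_not_mem t hm, pv_occurs_rec w t hw hsp]
      constructor
      · intro h
        simp at h
        subst h
        exact Or.inl (List.takeWhile_eq_self_iff.2 (fun a ha => by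
          simp
          exact fun hh => hm (hh ▸ ha)))
      · rintro (h | ⟨hmm, -⟩)
        · have : t.takeWhile (· != ' ') = t := List.takeWhile_eq_self_iff.2 (fun a ha => by
            simp
            exact fun hh => hm (hh ▸ ha))
          simp [← h, this]
        · exact absurd hmm hm

lemma pv_infix_iff (w t : List Char) (_hw : w ≠ []) (_hsp : ' ' ∉ w) :
    ((' ' :: (w ++ [' '])) <:+: (' ' :: (t ++ [' ']))) ↔ pvOccurs w t := by
  constructor
  · rintro ⟨p, s, hps⟩
    cases p with
    | nil =>
      simp only [List.nil_append] at hps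
      have h1 : w ++ [' '] ++ s = t ++ [' '] := by
        have := hps
        simp at this ⊢
        simpa using this
      rcases List.eq_nil_or_concat s with rfl | ⟨s', a, rfl⟩
      · simp at h1
        exact ⟨[], [], by simp [h1], Or.inl rfl, Or.inl rfl⟩
      · have h2 : (w ++ ' ' :: s') ++ [a] = t ++ [' '] := by
          simpa [List.concat_eq_append] using h1
        have := List.append_inj h2 (by
          have := congrArg List.length h2
          simp at this
          simp
          omega)
        exact ⟨[], ' ' :: s', by simp [← this.1], Or.inl rfl, Or.inr ⟨s', rfl⟩⟩
    | cons c p' =>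
      have hc : c = ' ' ∧ p' ++ (' ' :: (w ++ [' '])) ++ s = t ++ [' '] := by
        have := hps
        simp only [List.cons_append] at this
        exact ⟨(List.cons.injEq _ _ _ _ ▸ this).1, by
          have h := (List.cons.injEq _ _ _ _ ▸ this).2
          simpa using h⟩
      obtain ⟨-, h1⟩ := hc
      rcases List.eq_nil_or_concat s with rfl | ⟨s', a, rfl⟩
      · have h2 : (p' ++ ' ' :: w) ++ [' '] = t ++ [' '] := by simpa using h1
        have := (List.append_inj h2 (by
          have := congrArg List.length h2
          simp at this
          simp
          omega)).1
        exact ⟨p' ++ [' '], [], by simp [← this], Or.inr ⟨p', rfl⟩, Or.inl rfl⟩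
      · have h2 : (p' ++ ' ' :: w ++ ' ' :: s') ++ [a] = t ++ [' '] := by
          simpa [List.concat_eq_append] using h1
        have := (List.append_inj h2 (by
          have := congrArg List.length h2
          simp at this
          simp
          omega)).1
        exact ⟨p' ++ [' '], ' ' :: s', by simp [← this], Or.inr ⟨p', rfl⟩, Or.inr ⟨s', rfl⟩⟩
  · rintro ⟨l, r, rfl, hl, hr⟩
    rcases hl with rfl | ⟨l', rfl⟩
    · rcases hr with rfl | ⟨r', rfl⟩
      · exact ⟨[], [], by simp⟩
      · exact ⟨[], r' ++ [' '], by simp⟩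
    · rcases hr with rfl | ⟨r', rfl⟩
      · exact ⟨' ' :: l', [], by simp⟩
      · exact ⟨' ' :: l', r' ++ [' '], by simp⟩

-- the two per-word tests agree: A's padded-substring scan is token membership
lemma pv_word_test (t : List Char) (w : String) (hw : w.toList ≠ []) (hsp : ' ' ∉ w.toList) :
    PySem.Chars.isIn (' ' :: (w.toList ++ [' '])) (' ' :: (t ++ [' ']))
      = decide (w.toList ∈ PySem.Chars.splitOn t [' ']) := by
  rw [Bool.eq_iff_iff, PySem.Chars.isIn_iff_infix]
  rw [pv_infix_iff w.toList t hw hsp, ← pv_mem_splitOn_iff w.toList hw hsp t, ← pv_splitOn_eq]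
  simp

-- A's word list (as lists of chars) IS pvHinglish
def pvWordsA : List String :=
  ["apna", "bhai", "yaar", "hai", "haan", "han", "nahi", "nhi", "kya", "kyu", "kyun",
   "kaise", "mera", "meri", "teri", "tum", "aap", "hum", "ham", "matlab",
   "samajh", "samjha", "bata", "batao", "dikha", "dikhao", "karo", "karna",
   "chahiye", "krna", "krega", "krdo", "pls", "please", "sir", "maam",
   "college", "nsut", "dtu", "iit"]

set_option maxRecDepth 8192 in
lemma pv_words_eq : pvWordsA.map String.toList = pvHinglish := by decide

set_option maxRecDepth 8192 in
lemma pv_words_ok : ∀ w ∈ pvWordsA, w.toList ≠ [] ∧ ' ' ∉ w.toList := by decide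

lemma pv_hinglish_nodup : pvHinglish.Nodup :=
  PySem.Set.nodup_ofList _

-- the set B's loop would build if it never exited early
def pvFinal (toks : List (List Char)) (seen : PySem.Set (List Char)) : PySem.Set (List Char) :=
  toks.foldl
    (fun s tok =>
      if PySem.Set.contains pvHinglish tok && !(PySem.Set.contains s tok) then PySem.Set.add s tok
      else s) seen

lemma pv_final_mono (toks : List (List Char)) (seen : PySem.Set (List Char)) :
    seen.length ≤ (pvFinal toks seen).length := by
  induction toks generalizing seen with
  | nil => simp [pvFinal]
  | cons tok rest ih =>
    simp only [pvFinal, List.foldl_cons]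
    split_ifs with h
    · calc seen.length ≤ (PySem.Set.add seen tok).length := by
            simp [PySem.Set.add]; split_ifs <;> simp
        _ ≤ _ := ih _
    · exact ih seen

lemma pv_final_nodup (toks : List (List Char)) (seen : PySem.Set (List Char))
    (hn : seen.Nodup) : (pvFinal toks seen).Nodup := by
  induction toks generalizing seen with
  | nil => simpa [pvFinal]
  | cons tok rest ih =>
    simp only [pvFinal, List.foldl_cons]
    split_ifs with h
    · exact ih _ (PySem.Set.nodup_add _ _ hn)
    · exact ih _ hn

lemma pv_final_mem (toks : List (List Char)) (seen : PySem.Set (List Char)) (x : List Char) :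
    x ∈ pvFinal toks seen ↔ x ∈ seen ∨ (x ∈ pvHinglish ∧ x ∈ toks) := by
  induction toks generalizing seen with
  | nil => simp [pvFinal]
  | cons tok rest ih =>
    simp only [pvFinal, List.foldl_cons]
    split_ifs with h
    · rw [show (rest.foldl _ (PySem.Set.add seen tok)) = pvFinal rest (PySem.Set.add seen tok)
          from rfl, ih]
      simp only [Bool.and_eq_true, Bool.not_eq_true'] at h
      have htok : tok ∈ pvHinglish := by
        have := h.1
        exact (PySem.Set.contains_iff _ _).1 this
      rw [PySem.Set.mem_add]
      constructor
      · rintro ((hx | rfl) | hx)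
        · exact Or.inl hx
        · exact Or.inr ⟨htok, by simp⟩
        · exact Or.inr ⟨hx.1, by simp [hx.2]⟩
      · rintro (hx | ⟨hk, hx⟩)
        · exact Or.inl (Or.inl hx)
        · rcases List.mem_cons.1 hx with rfl | hx'
          · exact Or.inl (Or.inr rfl)
          · exact Or.inr ⟨hk, hx'⟩
    · rw [show (rest.foldl _ seen) = pvFinal rest seen from rfl, ih]
      rw [Bool.and_eq_true, not_and] at h
      constructor
      · rintro (hx | hx)
        · exact Or.inl hx
        · exact Or.inr ⟨hx.1, by simp [hx.2]⟩
      · rintro (hx | ⟨hk, hx⟩)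
        · exact Or.inl hx
        · rcases List.mem_cons.1 hx with rfl | hx'
          · -- guard false but tok ∈ pvHinglish: then tok ∈ seen
            by_cases hs : x ∈ seen
            · exact Or.inl hs
            · exfalso
              have h1 : PySem.Set.contains pvHinglish x = true := (PySem.Set.contains_iff _ _).2 hk
              have h2 : PySem.Set.contains seen x = false := by
                rw [Bool.eq_false_iff]
                intro hc
                exact hs ((PySem.Set.contains_iff _ _).1 hc)
              have := h h1
              rw [h2] at this
              simp at this
          · exact Or.inr ⟨hk, hx'⟩

-- the early-exit scan decides exactly "the final set has ≥ 2 elements"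
lemma pv_scan_eq (toks : List (List Char)) (seen : PySem.Set (List Char))
    (hn : seen.Nodup) (hle : seen.length ≤ 1) :
    pvScan toks seen = if 2 ≤ (pvFinal toks seen).length then "hinglish" else "english" := by
  induction toks generalizing seen with
  | nil =>
    simp only [pvScan, pvFinal, List.foldl_nil]
    rw [if_neg (by omega)]
  | cons tok rest ih =>
    by_cases h : (PySem.Set.contains pvHinglish tok && !(PySem.Set.contains seen tok)) = true
    · have hfresh : tok ∉ seen := by
        rw [Bool.and_eq_true] at h
        intro hm
        have hc := (PySem.Set.contains_iff seen tok).2 hm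
        rw [Bool.not_eq_eq_eq_not, Bool.not_true, Bool.eq_false_iff] at h
        exact absurd hc h.2
      have hadd : PySem.Set.add seen tok = seen ++ [tok] := PySem.Set.add_of_not_mem hfresh
      have hstep : pvFinal (tok :: rest) seen = pvFinal rest (PySem.Set.add seen tok) := by
        simp only [pvFinal, List.foldl_cons, if_pos h]
      rw [hstep]
      by_cases h2 : 2 ≤ PySem.Set.len (PySem.Set.add seen tok)
      · have hbig : 2 ≤ (pvFinal rest (PySem.Set.add seen tok)).length := by
          have := pv_final_mono rest (PySem.Set.add seen tok)
          simp only [PySem.Set.len] at h2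
          omega
        rw [if_pos hbig]
        show (if _ then _ else _) = _
        rw [if_pos h]
        simp only [if_pos h2]
      · show (if _ then _ else _) = _
        rw [if_pos h]
        simp only [if_neg h2]
        exact ih _ (PySem.Set.nodup_add _ _ hn)
          (by simp only [PySem.Set.len] at h2; omega)
    · have hstep : pvFinal (tok :: rest) seen = pvFinal rest seen := by
        simp only [pvFinal, List.foldl_cons, if_neg h]
      rw [hstep]
      show (if _ then _ else _) = _
      rw [if_neg h]
      exact ih seen hn hle

-- the final set from ∅ is (a permutation of) the keywords that occur among the tokens
lemma pv_final_length (toks : List (List Char)) :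
    (pvFinal toks PySem.Set.empty).length
      = (pvHinglish.filter (fun w => decide (w ∈ toks))).length := by
  have hperm : (pvFinal toks PySem.Set.empty).Perm
      (pvHinglish.filter (fun w => decide (w ∈ toks))) := by
    rw [List.perm_ext_iff_of_nodup (pv_final_nodup _ _ (by simp [PySem.Set.empty]))
      (pv_hinglish_nodup.filter _)]
    intro x
    rw [pv_final_mem, List.mem_filter]
    simp [PySem.Set.empty]
  exact hperm.length_eq

-- A's counting loop is a countP over the word list
lemma pv_hits_eq (t : List Char) :
    pvWordsA.foldl
        (fun hits w =>
          if PySem.Chars.isIn (' ' :: (w.toList ++ [' '])) (' ' :: (t ++ [' '])) then hits + 1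
          else hits) (0 : Int)
      = ((pvHinglish.filter
          (fun w => decide (w ∈ PySem.Chars.splitOn t [' ']))).length : Int) := by
  rw [PySem.List.foldl_ite_add_one
    (p := fun w : String =>
      PySem.Chars.isIn (' ' :: (w.toList ++ [' '])) (' ' :: (t ++ [' '])) = true)]
  rw [← List.countP_eq_length_filter]
  have : List.countP
      (fun w => decide (PySem.Chars.isIn (' ' :: (w.toList ++ [' '])) (' ' :: (t ++ [' '])) = true))
      pvWordsA
      = List.countP (fun w => decide (w ∈ PySem.Chars.splitOn t [' ']))
          (pvWordsA.map String.toList) := by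
    rw [List.countP_map]
    apply List.countP_congr
    intro w hwmem
    obtain ⟨hw, hsp⟩ := pv_words_ok w hwmem
    simp only [Function.comp_apply, decide_eq_true_eq]
    rw [pv_word_test t w hw hsp]
    simp
  rw [this, pv_words_eq]
  omega

-- ===== VERDICT (by name: the statement is the Claim_ definition above) =====
theorem detect_language_style_spec : Claim_equal_detect_language_style := by
  intro text _
  unfold Spec_detect_language_style detect_language_style detect_language_style_alt
  by_cases h0 : text = ""
  · simp [h0]
  · rw [if_neg h0, if_neg h0]
    set t := PySem.Chars.strip (PySem.Chars.lower text.toList) with ht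
    rw [pv_scan_eq _ _ (by simp [PySem.Set.empty]) (by simp [PySem.Set.empty])]
    rw [pv_final_length]
    show (if 2 ≤ pvWordsA.foldl _ (0 : Int) then "hinglish" else "english") = _
    rw [pv_hits_eq t]
    exact if_congr (by omega) rfl rfl
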